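-- pv_equiv track=rewrite | github.com/alexandraback/datacollection | solutions_5686275109552128_0/Python/Sean223/B-solution.py | solve
-- ===== SOURCE A (Python) =====
-- def solve(pancakes):
--     for num_minutes in range(1, 10):
--         if max(pancakes) <= num_minutes:
--             return num_minutes
--
--         for num_special_minutes in range(1, num_minutes):
--             special = pancakes[:]
--             target = num_minutes - num_special_minutes
--
--             for i in range(num_special_minutes):
--                 largest = max(special)
--                 special.remove(largest)
--                 special.append(target)
--                 special.append(largest - target)
--
--             if max(special) <= target:
--                 return num_minutes
-- ===== SOURCE B (Python) =====
-- def solve(pancakes):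
--     best = min(d + sum(max(0, (p - 1) // d) for p in pancakes) for d in range(1, 10))
--     if best <= 9:
--         return best
-- ===== Notes on version B (the rewrite author's own statement) =====
-- stated objective: faster
-- what changed: A simulates the greedy cutting process (for each minute budget and each split count, copy the list and repeatedly remove the max and append two pieces); B computes the answer in closed form as min over per-minute caps d in 1..9 of d + sum(max(0,(p-1)//d)), returning it when it is at most 9.
-- outside the precondition, e.g. on solve([]): A raises ValueError, B returns 1; on solve([1000]): A returns None, B returns None
import Mathlib
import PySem

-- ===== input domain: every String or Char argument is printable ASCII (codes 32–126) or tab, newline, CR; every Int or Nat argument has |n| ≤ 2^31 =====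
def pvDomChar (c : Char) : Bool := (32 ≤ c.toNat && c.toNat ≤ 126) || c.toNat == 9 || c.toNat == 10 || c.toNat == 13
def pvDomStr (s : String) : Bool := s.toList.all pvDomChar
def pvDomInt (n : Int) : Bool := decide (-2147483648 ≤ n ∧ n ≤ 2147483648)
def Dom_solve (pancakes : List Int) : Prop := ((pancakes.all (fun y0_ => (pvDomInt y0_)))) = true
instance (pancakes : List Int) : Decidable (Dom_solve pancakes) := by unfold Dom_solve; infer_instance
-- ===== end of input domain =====

-- B replaces A's greedy split-simulation (nested loops mutating a working copy) by the closed-form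
-- minimum over per-minute caps d of d + Σ max(0, (p-1)//d); objective: faster (a timing run
-- measured B faster; no per-candidate list copying or mutation) and simpler.

-- ===== PORT A =====
-- one iteration of 'for i in range(num_special_minutes)': cut the largest stack, leaving a piece of
-- size target. 'max(special)' and 'special.remove(largest)' cannot fail for nonempty special (the
-- max is always present); the getD defaults are only reached on the empty list, outside Pre_solve.
def cutOnce (special : List Int) (target : Int) : List Int :=
  let largest := (PySem.List.max? special (fun y => y)).getD 0
  ((PySem.List.remove? special largest).getD special) ++ [target, largest - target]

def cutLoop (special : List Int) (target : Int) : Nat → List Int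
  | 0 => special
  | k + 1 => cutLoop (cutOnce special target) target k

-- 'for num_special_minutes in range(1, num_minutes)': true iff some num_special_minutes succeeds
-- (Python returns num_minutes at the first success; the outer loop below returns it).
def innerLoop (pancakes : List Int) (num_minutes : Int) : List Int → Bool
  | [] => false
  | s :: rest =>
    let target := num_minutes - s
    let special := cutLoop pancakes target s.toNat   -- s ∈ range(1, num_minutes), so s.toNat = s
    if (PySem.List.max? special (fun y => y)).getD 0 ≤ target then true
    else innerLoop pancakes num_minutes rest

-- 'for num_minutes in range(1, 10)'; the [] case is Python's fall-through 'return None'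
-- (not an Int) — outside Pre_solve, as is the empty-list ValueError of max(pancakes).
def outerLoop (pancakes : List Int) : List Int → Int
  | [] => 0
  | m :: ms =>
    if (PySem.List.max? pancakes (fun y => y)).getD 0 ≤ m then m
    else if innerLoop pancakes m (PySem.List.pyRange 1 m) then m
    else outerLoop pancakes ms

def solve (pancakes : List Int) : Int := outerLoop pancakes (PySem.List.pyRange 1 10)

-- ===== PORT B =====
-- 'sum(max(0, (p - 1) // d) for p in pancakes)'
def cost (pancakes : List Int) (d : Int) : Int :=
  pancakes.foldl (fun acc p => acc + max 0 (PySem.Int.floordiv (p - 1) d)) 0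

-- 'min(d + cost(pancakes, d) for d in range(1, 10))'; the range is nonempty, so min never raises
-- and getD's default is unreachable. The final 0 is Python's implicit 'return None' (outside Pre_solve).
def solve_alt (pancakes : List Int) : Int :=
  let best := (PySem.List.min?
      ((PySem.List.pyRange 1 10).map (fun d => d + cost pancakes d)) (fun y => y)).getD 0
  if best ≤ 9 then best else 0

-- ===== PRECONDITION & SPEC =====
-- Pre_solve excludes the empty list, on which A's max(pancakes) raises ValueError, and inputs that
-- cannot be finished within 9 minutes (no cap d gives d + cuts ≤ 9), on which A falls off the loop
-- and returns None, which is not a value of the declared Int type.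
def Pre_solve (pancakes : List Int) : Prop :=
  pancakes ≠ [] ∧ ∃ d : Fin 9, ((d : Int) + 1) + cost pancakes ((d : Int) + 1) ≤ 9

instance (pancakes : List Int) : Decidable (Pre_solve pancakes) := by
  unfold Pre_solve; infer_instance

def pvWitness_solve : List Int := [3, 1, 4]

def Spec_solve (pancakes : List Int) (out : Int) : Prop := out = solve_alt pancakes
instance (pancakes : List Int) (out : Int) : Decidable (Spec_solve pancakes out) := by
  unfold Spec_solve; infer_instance

-- ===== CLAIM (what is proved, stated in full; the proofs are below) =====
def Claim_equal_solve : Prop :=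
  ∀ (pancakes : List Int), Dom_solve pancakes → Pre_solve pancakes →
    Spec_solve pancakes (solve pancakes)

-- ===== LEMMAS AND PROOFS =====

-- the per-stack cut count
def gcost (d p : Int) : Int := max 0 (PySem.Int.floordiv (p - 1) d)

theorem cost_eq_sum (pancakes : List Int) (d : Int) :
    cost pancakes d = (pancakes.map (gcost d)).sum := by
  unfold cost gcost
  simpa using PySem.List.foldl_add pancakes (fun p => max 0 (PySem.Int.floordiv (p - 1) d)) 0

theorem gcost_nonneg (d p : Int) : 0 ≤ gcost d p := le_max_left _ _

theorem cost_nonneg (xs : List Int) (d : Int) : 0 ≤ cost xs d := by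
  rw [cost_eq_sum]
  apply List.sum_nonneg
  intro x hx
  rcases List.mem_map.mp hx with ⟨p, _, rfl⟩
  exact gcost_nonneg d p

theorem gcost_eq_zero_iff {d : Int} (hd : 0 < d) (p : Int) : gcost d p = 0 ↔ p ≤ d := by
  unfold gcost
  have h := PySem.Int.floordiv_lt_iff_lt_mul (a := p - 1) (q := 1) hd
  constructor
  · intro h0
    have : PySem.Int.floordiv (p - 1) d < 1 := by omega
    have := h.mp this; omega
  · intro hp
    have : PySem.Int.floordiv (p - 1) d < 1 := h.mpr (by omega)
    omega

theorem cost_eq_zero_iff {d : Int} (hd : 0 < d) (xs : List Int) :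
    cost xs d = 0 ↔ ∀ p ∈ xs, p ≤ d := by
  rw [cost_eq_sum]
  constructor
  · intro h0 p hp
    have hnn : ∀ x ∈ (xs.map (gcost d)), 0 ≤ x := by
      intro x hx; rcases List.mem_map.mp hx with ⟨q, _, rfl⟩; exact gcost_nonneg d q
    have : gcost d p = 0 := by
      have hmem : gcost d p ∈ xs.map (gcost d) := List.mem_map.mpr ⟨p, hp, rfl⟩
      have hle := List.single_le_sum hnn _ hmem
      have := gcost_nonneg d p
      omega
    exact (gcost_eq_zero_iff hd p).mp this
  · intro h
    have : ∀ x ∈ (xs.map (gcost d)), x = 0 := by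
      intro x hx; rcases List.mem_map.mp hx with ⟨q, hq, rfl⟩
      exact (gcost_eq_zero_iff hd q).mpr (h q hq)
    simp [List.sum_eq_zero this]

theorem cost_perm {xs ys : List Int} (hp : xs.Perm ys) (d : Int) : cost xs d = cost ys d := by
  rw [cost_eq_sum, cost_eq_sum]
  exact (hp.map (gcost d)).sum_eq

theorem cost_append (xs ys : List Int) (d : Int) :
    cost (xs ++ ys) d = cost xs d + cost ys d := by
  simp [cost_eq_sum]

-- the maxD ≤ t test on a nonempty list
theorem maxD_le_iff {ys : List Int} (hne : ys ≠ []) (t : Int) :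
    ((PySem.List.max? ys (fun y => y)).getD 0 ≤ t) ↔ ∀ p ∈ ys, p ≤ t := by
  cases hmax : PySem.List.max? ys (fun y => y) with
  | none => exact absurd ((PySem.List.max?_eq_none_iff ys _).mp hmax) hne
  | some M =>
    have hM := PySem.List.max?_mem hmax
    have hmax' := PySem.List.max?_isMax hmax
    simp only [Option.getD_some]
    exact ⟨fun h p hp => le_trans (hmax' p hp) h, fun h => h M hM⟩

-- one cut reduces the needed-cut count by one (down to zero) and keeps the list nonempty
theorem cutOnce_cost {xs : List Int} (hne : xs ≠ []) {t : Int} (ht : 0 < t) :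
    cost (cutOnce xs t) t = max 0 (cost xs t - 1) ∧ cutOnce xs t ≠ [] := by
  cases hmax : PySem.List.max? xs (fun y => y) with
  | none => exact absurd ((PySem.List.max?_eq_none_iff xs _).mp hmax) hne
  | some M =>
    have hM := PySem.List.max?_mem hmax
    have hmaxM := PySem.List.max?_isMax hmax
    have hco : cutOnce xs t = xs.erase M ++ [t, M - t] := by
      simp [cutOnce, hmax, PySem.List.remove?_eq_some_erase xs M hM]
    rw [hco]
    refine ⟨?_, by simp⟩
    have hperm : xs.Perm (M :: xs.erase M) := List.perm_cons_erase hM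
    have hsplit : cost xs t = gcost t M + cost (xs.erase M) t := by
      rw [cost_perm hperm t, cost_eq_sum, cost_eq_sum]; simp
    have happ : cost (xs.erase M ++ [t, M - t]) t
        = cost (xs.erase M) t + (gcost t t + gcost t (M - t)) := by
      rw [cost_append, cost_eq_sum ([t, M - t])]; simp
    have hgt : gcost t t = 0 := (gcost_eq_zero_iff ht t).mpr le_rfl
    by_cases hMt : M ≤ t
    · -- everything already ≤ t: cost is 0 before and after
      have hall : ∀ p ∈ xs, p ≤ t := fun p hp => le_trans (hmaxM p hp) hMt
      have h0 : cost xs t = 0 := (cost_eq_zero_iff ht xs).mpr hall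
      have h0' : cost (xs.erase M) t = 0 :=
        (cost_eq_zero_iff ht _).mpr (fun p hp => hall p (List.mem_of_mem_erase hp))
      have hgMt : gcost t (M - t) = 0 := (gcost_eq_zero_iff ht _).mpr (by omega)
      rw [happ, h0', hgt, hgMt, h0]; simp
    · -- M > t: the cut on M turns gcost t M into gcost t M - 1
      rw [not_le] at hMt
      have hfd : PySem.Int.floordiv (M - 1) t ≥ 1 :=
        (PySem.Int.le_floordiv_iff_mul_le ht).mpr (by omega)
      have hgM : gcost t M = PySem.Int.floordiv (M - 1) t := by
        unfold gcost; omega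
      have hstep : PySem.Int.floordiv (M - t - 1) t = PySem.Int.floordiv (M - 1) t - 1 := by
        have h1 : M - t - 1 = M - 1 + (-1) * t := by ring
        rw [h1, PySem.Int.floordiv_eq_ediv_of_pos ht, PySem.Int.floordiv_eq_ediv_of_pos ht,
          Int.add_mul_ediv_right _ _ (by omega : t ≠ 0)]
        omega
      have hgMt : gcost t (M - t) = gcost t M - 1 := by
        unfold gcost
        rw [hstep]
        omega
      have hcnn := cost_nonneg (xs.erase M) t
      rw [happ, hgt, hgMt, hsplit]
      omega

theorem cutLoop_cost {t : Int} (ht : 0 < t) :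
    ∀ (k : Nat) (xs : List Int), xs ≠ [] →
      cost (cutLoop xs t k) t = max 0 (cost xs t - k) ∧ cutLoop xs t k ≠ [] := by
  intro k
  induction k with
  | zero =>
    intro xs hne
    have := cost_nonneg xs t
    exact ⟨by simp only [cutLoop]; omega, hne⟩
  | succ n ih =>
    intro xs hne
    obtain ⟨h1, h2⟩ := cutOnce_cost hne ht
    obtain ⟨h3, h4⟩ := ih (cutOnce xs t) h2
    have hnn := cost_nonneg xs t
    refine ⟨?_, h4⟩
    simp only [cutLoop, h3, h1]
    push_cast
    omega

-- one pass of the inner loop succeeds iff some admissible s covers the cut count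
theorem innerLoop_iff (pancakes : List Int) (hne : pancakes ≠ []) (m : Int) :
    ∀ l : List Int, (∀ s ∈ l, 1 ≤ s ∧ s < m) →
      (innerLoop pancakes m l = true ↔ ∃ s ∈ l, cost pancakes (m - s) ≤ s) := by
  intro l
  induction l with
  | nil => intro _; simp [innerLoop]
  | cons s rest ih =>
    intro hl
    obtain ⟨hs1, hsm⟩ := hl s (List.mem_cons_self)
    have ht : 0 < m - s := by omega
    obtain ⟨hc, hnel⟩ := cutLoop_cost ht s.toNat pancakes hne
    have hiff : ((PySem.List.max? (cutLoop pancakes (m - s) s.toNat) (fun y => y)).getD 0 ≤ m - s)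
        ↔ cost pancakes (m - s) ≤ s := by
      rw [maxD_le_iff hnel, ← cost_eq_zero_iff ht, hc]
      have : ((s.toNat : Int)) = s := by omega
      rw [this]
      have := cost_nonneg pancakes (m - s)
      omega
    simp only [innerLoop]
    by_cases hcase : (PySem.List.max? (cutLoop pancakes (m - s) s.toNat) (fun y => y)).getD 0 ≤ m - s
    · simp only [if_pos hcase]
      exact iff_of_true (by trivial) ⟨s, List.mem_cons_self, hiff.mp hcase⟩
    · simp only [if_neg hcase]
      rw [ih (fun x hx => hl x (List.mem_cons_of_mem s hx))]
      constructor
      · rintro ⟨x, hx, hcx⟩; exact ⟨x, List.mem_cons_of_mem s hx, hcx⟩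
      · rintro ⟨x, hx, hcx⟩
        rcases List.mem_cons.mp hx with rfl | hx'
        · exact absurd (hiff.mpr hcx) hcase
        · exact ⟨x, hx', hcx⟩

-- the minute-m feasibility test of A, characterized arithmetically
theorem feasible_iff (pancakes : List Int) (hne : pancakes ≠ []) {m : Int} (hm : 1 ≤ m) :
    (((PySem.List.max? pancakes (fun y => y)).getD 0 ≤ m) ∨
      innerLoop pancakes m (PySem.List.pyRange 1 m) = true)
    ↔ ∃ d, 1 ≤ d ∧ d ≤ m ∧ d + cost pancakes d ≤ m := by
  rw [maxD_le_iff hne, innerLoop_iff pancakes hne m (PySem.List.pyRange 1 m)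
    (fun s hs => PySem.List.mem_pyRange_one.mp hs)]
  constructor
  · rintro (hall | ⟨s, hs, hcs⟩)
    · refine ⟨m, hm, le_rfl, ?_⟩
      have : cost pancakes m = 0 := (cost_eq_zero_iff (by omega) pancakes).mpr hall
      omega
    · obtain ⟨hs1, hsm⟩ := PySem.List.mem_pyRange_one.mp hs
      exact ⟨m - s, by omega, by omega, by omega⟩
  · rintro ⟨d, hd1, hdm, hdc⟩
    by_cases hdm' : d = m
    · subst hdm'
      have hc0 : cost pancakes d = 0 := by have := cost_nonneg pancakes d; omega
      exact Or.inl ((cost_eq_zero_iff (by omega) pancakes).mp hc0 )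
    · refine Or.inr ⟨m - d, PySem.List.mem_pyRange_one.mpr ⟨by omega, by omega⟩, ?_⟩
      have he : m - (m - d) = d := by ring
      rw [he]; omega

-- the outer loop walks range(m, 10) and returns the first feasible minute, which is b
theorem outerLoop_eq (pancakes : List Int) (hne : pancakes ≠ []) (b : Int)
    (hbmem : ∃ d, 1 ≤ d ∧ d < 10 ∧ b = d + cost pancakes d)
    (hbmin : ∀ d, 1 ≤ d → d < 10 → b ≤ d + cost pancakes d)
    (hb9 : b ≤ 9) :
    ∀ (k : Nat) (m : Int), m = 10 - k → 1 ≤ m → m ≤ b →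
      outerLoop pancakes (PySem.List.pyRange m 10) = b := by
  intro k
  induction k with
  | zero => intro m hmk _ hmb; omega
  | succ n ih =>
    intro m hmk hm1 hmb
    have hm10 : m < 10 := by omega
    rw [PySem.List.pyRange_one_cons hm10]
    by_cases hfeas : ((PySem.List.max? pancakes (fun y => y)).getD 0 ≤ m) ∨
        innerLoop pancakes m (PySem.List.pyRange 1 m) = true
    · -- feasible at m: A returns m, and m must equal b
      have hmeq : m = b := by
        obtain ⟨d, hd1, hdm, hdc⟩ := (feasible_iff pancakes hne hm1).mp hfeas
        have hd10 : d < 10 := by omega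
        have := hbmin d hd1 hd10
        omega
      simp only [outerLoop]
      rcases hfeas with h | h
      · rw [if_pos h]; exact hmeq
      · by_cases h0 : (PySem.List.max? pancakes (fun y => y)).getD 0 ≤ m
        · rw [if_pos h0]; exact hmeq
        · rw [if_neg h0, if_pos h]; exact hmeq
    · -- not feasible at m: m < b, recurse
      have hnm : ¬ ∃ d, 1 ≤ d ∧ d ≤ m ∧ d + cost pancakes d ≤ m :=
        fun h => hfeas ((feasible_iff pancakes hne hm1).mpr h)
      have hmb' : m < b := by
        rcases lt_or_eq_of_le hmb with h | h
        · exact h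
        · exfalso
          obtain ⟨d, hd1, hd10, hbd⟩ := hbmem
          have := cost_nonneg pancakes d
          exact hnm ⟨d, hd1, by omega, by omega⟩
      rw [not_or] at hfeas
      obtain ⟨hf1, hf2⟩ := hfeas
      have hf2' : innerLoop pancakes m (PySem.List.pyRange 1 m) = false := by
        simpa using hf2
      simp only [outerLoop, if_neg hf1, hf2', Bool.false_eq_true, if_false]
      have hb' : b ≤ 9 := hb9
      obtain ⟨d, hd1, hd10, hbd⟩ := hbmem
      have : 1 ≤ b := by have := cost_nonneg pancakes d; omega
      exact ih (m + 1) (by omega) (by omega) (by omega)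

-- ===== VERDICT (by name: the statement is the Claim_ definition above) =====
theorem solve_spec : Claim_equal_solve := by
  unfold Claim_equal_solve
  intro pancakes _ hpre
  obtain ⟨hne, ⟨d0, hd0⟩⟩ := hpre
  unfold Spec_solve solve solve_alt
  set L := (PySem.List.pyRange 1 10).map (fun d => d + cost pancakes d) with hL
  have hLne : L ≠ [] := by
    rw [hL, PySem.List.pyRange_one_cons (by norm_num : (1:Int) < 10)]; simp
  cases hmin : PySem.List.min? L (fun y => y) with
  | none => exact absurd ((PySem.List.min?_eq_none_iff L _).mp hmin) hLne
  | some b =>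
    have hbmemL := PySem.List.min?_mem hmin
    have hbminL := PySem.List.min?_isMin hmin
    have hbmem : ∃ d, 1 ≤ d ∧ d < 10 ∧ b = d + cost pancakes d := by
      rcases List.mem_map.mp hbmemL with ⟨d, hd, rfl⟩
      obtain ⟨h1, h2⟩ := PySem.List.mem_pyRange_one.mp hd
      exact ⟨d, h1, h2, rfl⟩
    have hbmin : ∀ d, 1 ≤ d → d < 10 → b ≤ d + cost pancakes d := by
      intro d h1 h2
      exact hbminL _ (List.mem_map.mpr ⟨d, PySem.List.mem_pyRange_one.mpr ⟨h1, h2⟩, rfl⟩)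
    have hb9 : b ≤ 9 := by
      have hdmem : ((d0 : Int) + 1) + cost pancakes ((d0 : Int) + 1) ∈ L := by
        apply List.mem_map.mpr
        refine ⟨(d0 : Int) + 1, PySem.List.mem_pyRange_one.mpr ⟨by omega, ?_⟩, rfl⟩
        have := d0.isLt; omega
      have := hbminL _ hdmem
      omega
    have hb1 : 1 ≤ b := by
      obtain ⟨d, hd1, _, hbd⟩ := hbmem
      have := cost_nonneg pancakes d; omega
    simp only [Option.getD_some, if_pos hb9]
    exact outerLoop_eq pancakes hne b hbmem hbmin hb9 9 1 (by norm_num) le_rfl hb1
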